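-- pv_equiv track=rewrite | github.com/Fletacode/boj | 프로그래머스/2/340211. ［PCCP 기출문제］ 3번 ／ 충돌위험 찾기/［PCCP 기출문제］ 3번 ／ 충돌위험 찾기.py | cal_accident
-- ===== SOURCE A (Python) =====
-- def cal_accident(all_paths):
--     d = {}
--     for i, path in enumerate(all_paths):
--         for t,pos in enumerate(path):
--             d.setdefault(t+1,{})
--             d[t+1].setdefault(pos,0)
--             d[t+1][pos] += 1
--
--     total_accient = 0
--
--     for t in d:
--         for pos in d[t]:
--             if d[t][pos] > 1:
--                 total_accient += 1
--
--     return total_accient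
-- ===== SOURCE B (Python) =====
-- def cal_accident(all_paths):
--     # sort the flat (time, position) events, then scan maximal runs of equal
--     # events: each run longer than 1 is one collision
--     events = sorted((t + 1, pos) for path in all_paths for t, pos in enumerate(path))
--     total = 0
--     i = 0
--     n = len(events)
--     while i < n:
--         j = i + 1
--         while j < n and events[j] == events[i]:
--             j += 1
--         if j - i > 1:
--             total += 1
--         i = j
--     return total
-- ===== Notes on version B (the rewrite author's own statement) =====
-- stated objective: alternative
-- what changed: Replaces the nested dict-of-dicts counting and the nested >1 scan with sort-then-group: flatten all (time, position) events, sort them, and scan the sorted list counting maximal runs of identical events longer than 1.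
import Mathlib
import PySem

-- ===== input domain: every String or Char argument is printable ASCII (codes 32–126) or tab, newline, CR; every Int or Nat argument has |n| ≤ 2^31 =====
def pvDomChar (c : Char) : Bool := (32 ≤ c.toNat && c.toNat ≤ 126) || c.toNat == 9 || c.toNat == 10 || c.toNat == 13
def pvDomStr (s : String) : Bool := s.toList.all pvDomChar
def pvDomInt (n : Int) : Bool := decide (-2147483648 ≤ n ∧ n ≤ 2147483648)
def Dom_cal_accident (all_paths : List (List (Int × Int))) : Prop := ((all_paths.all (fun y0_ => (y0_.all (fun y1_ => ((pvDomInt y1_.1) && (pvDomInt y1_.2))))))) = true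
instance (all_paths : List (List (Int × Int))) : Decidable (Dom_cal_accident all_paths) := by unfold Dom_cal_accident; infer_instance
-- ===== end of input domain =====

-- B replaces A's nested dict-of-counters (and its nested >1 scan) with sort-then-group:
-- sort the flat event list and count maximal runs of identical events longer than 1;
-- objective: alternative (not faster).

-- ===== PORT A =====
def cal_accident (all_paths : List (List (Int × Int))) : Int :=
  let d : PySem.Dict Int (PySem.Dict (Int × Int) Int) :=
    (PySem.List.enumerate all_paths).foldl (fun d ipath =>
      (PySem.List.enumerate ipath.2).foldl (fun d tpos =>
        let d := d.setdefault (tpos.1 + 1) (PySem.Dict.mk [])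
        let inner := (d.getD (tpos.1 + 1) (PySem.Dict.mk [])).setdefault tpos.2 0
        let inner := inner.insert tpos.2 (inner.getD tpos.2 0 + 1)
        d.insert (tpos.1 + 1) inner) d) (PySem.Dict.mk [])
  d.keys.foldl (fun tot t =>
    (d.getD t (PySem.Dict.mk [])).keys.foldl (fun tot pos =>
      if (d.getD t (PySem.Dict.mk [])).getD pos 0 > 1 then tot + 1 else tot) tot) 0

-- ===== PORT B =====
-- the flat event list ((t + 1, pos) for path in all_paths for t, pos in enumerate(path))
def pvEvents (all_paths : List (List (Int × Int))) : List (Int × Int × Int) :=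
  all_paths.flatMap (fun path => (PySem.List.enumerate path).map (fun tp => (tp.1 + 1, tp.2)))

-- the while loop over the sorted list: one step handles the maximal run of the
-- head event (inner while j advances over equal events; total += 1 iff the run is longer than 1)
def pvCountRuns : List (Int × Int × Int) → Int
  | [] => 0
  | x :: xs =>
    (if xs.takeWhile (fun y => y == x) = [] then 0 else 1) +
      pvCountRuns (xs.dropWhile (fun y => y == x))
termination_by l => l.length
decreasing_by
  simp only [List.length_cons]
  exact Nat.lt_succ_of_le (List.length_dropWhile_le _ _)

-- Python's '<' on the nested int tuples (t, (a, b)): lexicographic, level by level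
def pvLtB (a b : Int × Int × Int) : Bool :=
  decide (a.1 < b.1) ||
    (decide (a.1 = b.1) &&
      (decide (a.2.1 < b.2.1) || (decide (a.2.1 = b.2.1) && decide (a.2.2 < b.2.2))))

-- sorted(events): ported by hand as the stable insertion sort PySem.List.sorted performs
-- (sorted_eq_foldl_insertBy), with pvLtB as the comparison; exact for Python's sorted on
-- these nested int tuples because pvLtB is exactly Python's tuple '<' and the sort is stable.
def pvSortedLex (xs : List (Int × Int × Int)) : List (Int × Int × Int) :=
  xs.foldl (fun acc x => PySem.List.insertBy pvLtB x acc) []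

def cal_accident_alt (all_paths : List (List (Int × Int))) : Int :=
  let events := pvSortedLex (pvEvents all_paths)
  pvCountRuns events

-- ===== PRECONDITION & SPEC =====
def Spec_cal_accident (all_paths : List (List (Int × Int))) (out : Int) : Prop := out = cal_accident_alt all_paths
instance (all_paths : List (List (Int × Int))) (out : Int) : Decidable (Spec_cal_accident all_paths out) := by unfold Spec_cal_accident; infer_instance

-- ===== CLAIM (what is proved, stated in full; the proofs are below) =====
def Claim_equal_cal_accident : Prop := ∀ (all_paths : List (List (Int × Int))), Dom_cal_accident all_paths → Spec_cal_accident all_paths (cal_accident all_paths)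

-- ===== LEMMAS AND PROOFS =====

-- A's loop body, on an already-shifted event (t, pos)
def pvStepA (d : PySem.Dict Int (PySem.Dict (Int × Int) Int)) (e : Int × Int × Int) :
    PySem.Dict Int (PySem.Dict (Int × Int) Int) :=
  let d := d.setdefault e.1 (PySem.Dict.mk [])
  let inner := (d.getD e.1 (PySem.Dict.mk [])).setdefault e.2 0
  let inner := inner.insert e.2 (inner.getD e.2 0 + 1)
  d.insert e.1 inner

def pvBuild (l : List (Int × Int × Int)) : PySem.Dict Int (PySem.Dict (Int × Int) Int) :=
  l.foldl pvStepA (PySem.Dict.mk [])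

-- positions recorded at time t, in order
def pvPossAt (t : Int) (l : List (Int × Int × Int)) : List (Int × Int) :=
  (l.filter (fun e => e.1 == t)).map (fun e => e.2)

theorem pv_contains_iff {κ ν : Type} [BEq κ] [LawfulBEq κ] (d : PySem.Dict κ ν) (k : κ) :
    d.contains k = true ↔ k ∈ d.keys := by
  simp [PySem.Dict.contains, PySem.Dict.keys, List.any_eq_true]

theorem pv_set_contains_iff {α : Type} [BEq α] [LawfulBEq α] (s : PySem.Set α) (x : α) :
    s.contains x = true ↔ x ∈ s := by
  simp [PySem.Set.contains]

theorem pv_ofList_snoc {α : Type} [BEq α] (l : List α) (x : α) :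
    PySem.Set.ofList (l ++ [x]) = (PySem.Set.ofList l).add x := by
  simp [PySem.Set.ofList, List.foldl_append]

theorem pv_keys_insert_of_contains {κ ν : Type} [BEq κ] [LawfulBEq κ] (d : PySem.Dict κ ν) (k : κ) (v : ν)
    (h : d.contains k = true) : (d.insert k v).keys = d.keys := by
  simp only [PySem.Dict.insert, h, if_true, PySem.Dict.keys, List.map_map]
  apply List.map_congr_left
  intro p _
  by_cases hp : p.1 = k
  · simp [hp]
  · simp [hp, beq_iff_eq]

theorem pv_dedup_snoc {α : Type} [BEq α] [LawfulBEq α] (l : List α) (x : α) :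
    PySem.List.dedup (l ++ [x]) =
      if x ∈ l then PySem.List.dedup l else PySem.List.dedup l ++ [x] := by
  rw [PySem.List.dedup_eq_ofList, PySem.List.dedup_eq_ofList, pv_ofList_snoc]
  by_cases h : x ∈ l
  · have hc : (PySem.Set.ofList l).contains x = true :=
      (pv_set_contains_iff _ x).mpr ((PySem.Set.mem_ofList l x).mpr h)
    simp [PySem.Set.add, h]
  · have hc : ¬ ((PySem.Set.ofList l).contains x = true) := fun hcc =>
      h ((PySem.Set.mem_ofList l x).mp ((pv_set_contains_iff _ x).mp hcc))
    simp [PySem.Set.add, h]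

theorem pv_possAt_snoc (t : Int) (l : List (Int × Int × Int)) (e : Int × Int × Int) :
    pvPossAt t (l ++ [e]) = pvPossAt t l ++ (if e.1 = t then [e.2] else []) := by
  simp only [pvPossAt, List.filter_append, List.map_append]
  by_cases h : e.1 = t <;> simp [h]

theorem pv_mem_possAt (t : Int) (p : Int × Int) (l : List (Int × Int × Int)) :
    p ∈ pvPossAt t l ↔ (t, p) ∈ l := by
  simp only [pvPossAt, List.mem_map, List.mem_filter, beq_iff_eq]
  constructor
  · rintro ⟨e, ⟨he, h1⟩, h2⟩
    have : e = (t, p) := by cases e; simp_all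
    exact this ▸ he
  · intro h; exact ⟨(t, p), ⟨h, rfl⟩, rfl⟩

theorem pv_possAt_nil_of_not_mem (t : Int) (l : List (Int × Int × Int))
    (h : t ∉ l.map (fun e => e.1)) : pvPossAt t l = [] := by
  simp only [pvPossAt, List.map_eq_nil_iff]
  apply List.filter_eq_nil_iff.mpr
  intro e he
  simp only [beq_iff_eq]
  intro het
  exact h (List.mem_map.mpr ⟨e, he, het⟩)

theorem pv_count_possAt (t : Int) (p : Int × Int) (l : List (Int × Int × Int)) :
    (pvPossAt t l).count p = l.count (t, p) := by
  induction l with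
  | nil => rfl
  | cons e l ih =>
    by_cases h : e.1 = t
    · by_cases h2 : e.2 = p
      · have : e = (t, p) := by cases e; simp_all
        simp [pvPossAt, this, ← ih]
      · have : e ≠ (t, p) := by intro hc; subst hc; simp at h2
        simp [pvPossAt, h, h2, this, ← ih]
    · have : e ≠ (t, p) := by intro hc; subst hc; simp at h
      simp [pvPossAt, h, this, ← ih]

-- the three-part invariant of A's dict build
theorem pv_inv (l : List (Int × Int × Int)) :
    (pvBuild l).keys = PySem.List.dedup (l.map (fun e => e.1)) ∧
    (∀ t, ((pvBuild l).getD t (PySem.Dict.mk [])).keys = PySem.List.dedup (pvPossAt t l)) ∧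
    (∀ t p, ((pvBuild l).getD t (PySem.Dict.mk [])).getD p 0 = ((pvPossAt t l).count p : Int)) := by
  induction l using List.reverseRecOn with
  | nil =>
    refine ⟨rfl, fun t => ?_, fun t p => ?_⟩ <;>
      simp [pvBuild, pvPossAt, PySem.Dict.getD, PySem.Dict.get?, PySem.Dict.keys, PySem.List.dedup]
  | append_singleton l e ih =>
    obtain ⟨ih1, ih2, ih3⟩ := ih
    have hbuild : pvBuild (l ++ [e]) = pvStepA (pvBuild l) e := by
      simp [pvBuild, List.foldl_append]
    set D := pvBuild l with hD
    -- facts about the outer setdefault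
    have hconD : (D.contains e.1 = true) ↔ e.1 ∈ l.map (fun e => e.1) := by
      rw [pv_contains_iff, ih1, PySem.List.mem_dedup]
    have hc1 : (D.setdefault e.1 (PySem.Dict.mk [])).contains e.1 = true := by
      rw [PySem.Dict.contains_setdefault]; simp
    -- the updated inner dict
    have hgetDe : ∀ d0, (pvStepA D e).getD e.1 d0 =
        (((D.getD e.1 (PySem.Dict.mk [])).setdefault e.2 0).insert e.2
          (((D.getD e.1 (PySem.Dict.mk [])).setdefault e.2 0).getD e.2 0 + 1)) := by
      intro d0
      simp only [pvStepA, PySem.Dict.getD_insert, PySem.Dict.getD_setdefault_self]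
      simp
    have hgetDne : ∀ t d0, t ≠ e.1 → (pvStepA D e).getD t d0 = D.getD t d0 := by
      intro t d0 ht
      simp only [pvStepA, PySem.Dict.getD_insert, if_neg ht]
      simp only [PySem.Dict.getD]
      rw [PySem.Dict.get?_setdefault_of_ne _ _ ht]
    have hconI : ∀ p, ((D.getD e.1 (PySem.Dict.mk [])).contains p = true) ↔ p ∈ pvPossAt e.1 l := by
      intro p
      rw [pv_contains_iff, ih2 e.1, PySem.List.mem_dedup]
    refine ⟨?_, ?_, ?_⟩
    · -- outer keys
      rw [hbuild]
      show (pvStepA D e).keys = _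
      simp only [pvStepA]
      rw [pv_keys_insert_of_contains _ _ _ hc1, PySem.Dict.keys_setdefault, List.map_append]
      simp only [List.map_cons, List.map_nil]
      rw [pv_dedup_snoc]
      by_cases hm : e.1 ∈ l.map (fun e => e.1)
      · rw [if_pos (hconD.mpr hm), if_pos hm, ih1]
      · rw [if_neg (fun hcc => hm (hconD.mp hcc)), if_neg hm, ih1]
    · -- inner keys
      intro t
      rw [hbuild]
      by_cases ht : t = e.1
      · subst ht
        rw [hgetDe (PySem.Dict.mk [])]
        have hcI : ((D.getD e.1 (PySem.Dict.mk [])).setdefault e.2 0).contains e.2 = true := by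
          rw [PySem.Dict.contains_setdefault]; simp
        rw [pv_keys_insert_of_contains _ _ _ hcI, PySem.Dict.keys_setdefault,
          pv_possAt_snoc, if_pos rfl, pv_dedup_snoc]
        by_cases hp : e.2 ∈ pvPossAt e.1 l
        · rw [if_pos ((hconI e.2).mpr hp), if_pos hp, ih2]
        · rw [if_neg (fun hcc => hp ((hconI e.2).mp hcc)), if_neg hp, ih2]
      · rw [hgetDne t _ ht, pv_possAt_snoc, if_neg (fun hc => ht hc.symm), List.append_nil]
        exact ih2 t
    · -- inner values
      intro t p
      rw [hbuild]
      by_cases ht : t = e.1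
      · subst ht
        rw [hgetDe (PySem.Dict.mk []), PySem.Dict.getD_insert]
        rw [pv_possAt_snoc, if_pos rfl, List.count_append]
        by_cases hp : p = e.2
        · subst hp
          rw [if_pos rfl, PySem.Dict.getD_setdefault_self, ih3]
          have h1 : List.count e.2 [e.2] = 1 := by simp
          rw [h1]
          push_cast
          ring
        · rw [if_neg hp]
          have hq : ((D.getD e.1 (PySem.Dict.mk [])).setdefault e.2 0).getD p 0
              = (D.getD e.1 (PySem.Dict.mk [])).getD p 0 := by
            simp only [PySem.Dict.getD]
            rw [PySem.Dict.get?_setdefault_of_ne _ _ hp]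
          have h0 : List.count p [e.2] = 0 := by
            rw [List.count_eq_zero]
            simp [hp]
          rw [hq, ih3, h0]
          simp
      · rw [hgetDne t _ ht, pv_possAt_snoc, if_neg (fun hc => ht hc.symm), List.append_nil]
        exact ih3 t p

theorem pv_sum_map_update (ks : List Int) (t : Int) (f g : Int → Int)
    (hnd : ks.Nodup) (ht : t ∈ ks) (hfg : ∀ u ∈ ks, u ≠ t → f u = g u) :
    (ks.map f).sum = (ks.map g).sum + (f t - g t) := by
  induction ks with
  | nil => simp at ht
  | cons k ks ih =>
    have hk : k ∉ ks := (List.nodup_cons.mp hnd).1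
    rcases List.mem_cons.mp ht with h | h
    · subst h
      have hmap : ks.map f = ks.map g := by
        apply List.map_congr_left
        intro u hu
        exact hfg u (List.mem_cons_of_mem _ hu) (fun hc => hk (hc ▸ hu))
      simp [hmap]; ring
    · have hkt : k ≠ t := fun hc => hk (hc ▸ h)
      have hrec := ih (List.nodup_cons.mp hnd).2 h (fun u hu => hfg u (List.mem_cons_of_mem _ hu))
      simp only [List.map_cons, List.sum_cons, hrec, hfg k List.mem_cons_self hkt]
      ring

-- grouping: summing per-time counts of distinct positions counts distinct events
theorem pv_group (l : List (Int × Int × Int)) (P : Int × Int × Int → Bool) :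
    ((PySem.List.dedup (l.map (fun e => e.1))).map
      (fun t => (((PySem.List.dedup (pvPossAt t l)).countP (fun p => P (t, p)) : Nat) : Int))).sum
    = ((PySem.List.dedup l).countP P : Int) := by
  induction l using List.reverseRecOn with
  | nil => simp [pvPossAt, PySem.List.dedup]
  | append_singleton l e ih =>
    rw [List.map_append]
    simp only [List.map_cons, List.map_nil]
    rw [pv_dedup_snoc (l.map (fun e => e.1)) e.1, pv_dedup_snoc l e]
    by_cases hm : e.1 ∈ l.map (fun e => e.1)
    · by_cases hp : e.2 ∈ pvPossAt e.1 l
      · have hel : e ∈ l := by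
          have := (pv_mem_possAt e.1 e.2 l).mp hp
          simpa using this
        rw [if_pos hm, if_pos hel, ← ih]
        apply congrArg
        apply List.map_congr_left
        intro t htm
        rw [pv_possAt_snoc]
        by_cases ht : e.1 = t
        · subst ht
          rw [if_pos rfl, pv_dedup_snoc, if_pos hp]
        · rw [if_neg ht, List.append_nil]
      · have hel : e ∉ l := by
          intro hc
          exact hp ((pv_mem_possAt e.1 e.2 l).mpr (by simpa using hc))
        rw [if_pos hm, if_neg hel, List.countP_append]
        have hfg : ∀ u ∈ PySem.List.dedup (l.map (fun e => e.1)), u ≠ e.1 →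
            (((PySem.List.dedup (pvPossAt u (l ++ [e]))).countP (fun p => P (u, p)) : Nat) : Int)
            = (((PySem.List.dedup (pvPossAt u l)).countP (fun p => P (u, p)) : Nat) : Int) := by
          intro u _ hu
          rw [pv_possAt_snoc, if_neg (fun hc => hu hc.symm), List.append_nil]
        rw [pv_sum_map_update _ e.1 _ _ (PySem.List.nodup_dedup _)
          ((PySem.List.mem_dedup _ _).mpr hm) hfg, ih]
        have hnew : pvPossAt e.1 (l ++ [e]) = pvPossAt e.1 l ++ [e.2] := by
          rw [pv_possAt_snoc, if_pos rfl]
        rw [hnew, pv_dedup_snoc, if_neg hp, List.countP_append]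
        have : (e.1, e.2) = e := rfl
        simp [this]
    · have hel : e ∉ l := fun hc => hm (List.mem_map.mpr ⟨e, hc, rfl⟩)
      rw [if_neg hm, if_neg hel, List.map_append, List.sum_append, List.countP_append]
      have hmap : ∀ u ∈ PySem.List.dedup (l.map (fun e => e.1)),
          (((PySem.List.dedup (pvPossAt u (l ++ [e]))).countP (fun p => P (u, p)) : Nat) : Int)
          = (((PySem.List.dedup (pvPossAt u l)).countP (fun p => P (u, p)) : Nat) : Int) := by
        intro u hu
        have hun : e.1 ≠ u := by
          intro hc
          exact hm (hc ▸ (PySem.List.mem_dedup _ _).mp hu)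
        rw [pv_possAt_snoc, if_neg hun, List.append_nil]
      rw [List.map_congr_left hmap, ih]
      have h0 : pvPossAt e.1 l = [] := pv_possAt_nil_of_not_mem e.1 l hm
      have hnew : pvPossAt e.1 (l ++ [e]) = [e.2] := by
        rw [pv_possAt_snoc, if_pos rfl, h0, List.nil_append]
      have hded : PySem.List.dedup (pvPossAt e.1 (l ++ [e])) = [e.2] := by
        rw [hnew]
        rfl
      simp only [List.map_cons, List.map_nil, List.sum_cons, List.sum_nil, hded]
      have hpe : (e.1, e.2) = e := rfl
      rw [show List.countP (fun p => P (e.1, p)) [e.2] = List.countP P [e] from by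
        simp [List.countP_cons, hpe]]
      push_cast
      ring

-- the outer double loop of A, as a fold of pvStepA over the flat event list
theorem pv_A_build (all_paths : List (List (Int × Int))) : ∀ (s : Int)
    (d0 : PySem.Dict Int (PySem.Dict (Int × Int) Int)),
    (PySem.List.enumerate all_paths s).foldl (fun d ipath =>
      (PySem.List.enumerate ipath.2).foldl (fun d tpos => pvStepA d (tpos.1 + 1, tpos.2)) d) d0
    = (pvEvents all_paths).foldl pvStepA d0 := by
  induction all_paths with
  | nil => intro s d0; rfl
  | cons path rest ih =>
    intro s d0
    rw [show PySem.List.enumerate (path :: rest) s = (s, path) :: PySem.List.enumerate rest (s + 1)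
      from PySem.List.enumerate_cons path rest s]
    rw [List.foldl_cons, ih]
    show (pvEvents rest).foldl pvStepA
        ((PySem.List.enumerate path).foldl (fun d tpos => pvStepA d (tpos.1 + 1, tpos.2)) d0) = _
    have hinner : (PySem.List.enumerate path).foldl (fun d tpos => pvStepA d (tpos.1 + 1, tpos.2)) d0
        = ((PySem.List.enumerate path).map (fun tp => (tp.1 + 1, tp.2))).foldl pvStepA d0 := by
      rw [List.foldl_map]
    rw [hinner]
    simp only [pvEvents, List.flatMap_cons, List.foldl_append]

-- A computes the grouped sum over its dict
theorem pv_A_eq (all_paths : List (List (Int × Int))) :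
    cal_accident all_paths =
      ((PySem.List.dedup ((pvEvents all_paths).map (fun e => e.1))).map
        (fun t => (((PySem.List.dedup (pvPossAt t (pvEvents all_paths))).countP
          (fun p => decide (1 < (pvPossAt t (pvEvents all_paths)).count p)) : Nat) : Int))).sum := by
  have hd : (PySem.List.enumerate all_paths).foldl (fun d ipath =>
      (PySem.List.enumerate ipath.2).foldl (fun d tpos =>
        let d := d.setdefault (tpos.1 + 1) (PySem.Dict.mk [])
        let inner := (d.getD (tpos.1 + 1) (PySem.Dict.mk [])).setdefault tpos.2 0
        let inner := inner.insert tpos.2 (inner.getD tpos.2 0 + 1)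
        d.insert (tpos.1 + 1) inner) d) (PySem.Dict.mk [])
      = pvBuild (pvEvents all_paths) := pv_A_build all_paths 0 (PySem.Dict.mk [])
  show ((PySem.List.enumerate all_paths).foldl _ (PySem.Dict.mk [])).keys.foldl _ 0 = _
  rw [hd]
  obtain ⟨h1, h2, h3⟩ := pv_inv (pvEvents all_paths)
  set E := pvEvents all_paths with hE
  have hin : ∀ (t : Int) (a : Int),
      ((pvBuild E).getD t (PySem.Dict.mk [])).keys.foldl (fun tot pos =>
        if ((pvBuild E).getD t (PySem.Dict.mk [])).getD pos 0 > 1 then tot + 1 else tot) a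
      = a + (((PySem.List.dedup (pvPossAt t E)).countP
          (fun p => decide (1 < (pvPossAt t E).count p)) : Nat) : Int) := by
    intro t a
    rw [h2 t]
    have hcong : (fun (tot : Int) pos =>
        if ((pvBuild E).getD t (PySem.Dict.mk [])).getD pos 0 > 1 then tot + 1 else tot)
        = (fun (tot : Int) pos =>
            if (fun p => decide (1 < (pvPossAt t E).count p)) pos = true then tot + 1 else tot) := by
      funext tot pos
      rw [h3 t pos]
      simp [gt_iff_lt]
    rw [hcong, PySem.List.foldl_count_if]
  have hout : ∀ (ks : List Int) (a : Int),
      ks.foldl (fun tot t =>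
        ((pvBuild E).getD t (PySem.Dict.mk [])).keys.foldl (fun tot pos =>
          if ((pvBuild E).getD t (PySem.Dict.mk [])).getD pos 0 > 1 then tot + 1 else tot) tot) a
      = a + (ks.map (fun t => (((PySem.List.dedup (pvPossAt t E)).countP
          (fun p => decide (1 < (pvPossAt t E).count p)) : Nat) : Int))).sum := by
    intro ks
    induction ks with
    | nil => intro a; simp
    | cons k ks ihk =>
      intro a
      rw [List.foldl_cons, hin k a, ihk, List.map_cons, List.sum_cons]
      ring
  rw [hout, h1]
  ring

-- A = the number of distinct duplicated events
theorem pv_A_count (all_paths : List (List (Int × Int))) :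
    cal_accident all_paths =
      ((PySem.List.dedup (pvEvents all_paths)).countP
        (fun e => decide (1 < (pvEvents all_paths).count e)) : Int) := by
  rw [pv_A_eq,
    ← pv_group (pvEvents all_paths) (fun e => decide (1 < (pvEvents all_paths).count e))]
  apply congrArg List.sum
  apply List.map_congr_left
  intro t _
  apply congrArg (fun n : Nat => (n : Int))
  apply List.countP_congr
  intro p _
  simp [pv_count_possAt]

-- ========== B-side: sorted order and runs ==========

theorem pvLtB_iff (a b : Int × Int × Int) :
    pvLtB a b = true ↔
      (a.1 < b.1 ∨ (a.1 = b.1 ∧ (a.2.1 < b.2.1 ∨ (a.2.1 = b.2.1 ∧ a.2.2 < b.2.2)))) := by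
  simp [pvLtB]

theorem pv_lt_asymm (a b : Int × Int × Int) (h : pvLtB a b = true) : pvLtB b a = false := by
  rw [Bool.eq_false_iff, Ne, pvLtB_iff]
  rw [pvLtB_iff] at h
  obtain ⟨a1, a2, a3⟩ := a
  obtain ⟨b1, b2, b3⟩ := b
  dsimp only at *
  omega

theorem pv_le_trans (a b c : Int × Int × Int)
    (hab : pvLtB b a = false) (hbc : pvLtB c b = false) : pvLtB c a = false := by
  rw [Bool.eq_false_iff, Ne, pvLtB_iff] at *
  obtain ⟨a1, a2, a3⟩ := a
  obtain ⟨b1, b2, b3⟩ := b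
  obtain ⟨c1, c2, c3⟩ := c
  dsimp only at *
  omega

theorem pv_le_antisymm (a b : Int × Int × Int)
    (hab : pvLtB b a = false) (hba : pvLtB a b = false) : a = b := by
  rw [Bool.eq_false_iff, Ne, pvLtB_iff] at *
  obtain ⟨a1, a2, a3⟩ := a
  obtain ⟨b1, b2, b3⟩ := b
  dsimp only at *
  have : a1 = b1 ∧ a2 = b2 ∧ a3 = b3 := by omega
  simp [this.1, this.2.1, this.2.2]

-- insertion keeps the list sorted (≤ = "not strictly after")
theorem pv_insert_pairwise (x : Int × Int × Int) (ys : List (Int × Int × Int))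
    (h : ys.Pairwise (fun a b => pvLtB b a = false)) :
    (PySem.List.insertBy pvLtB x ys).Pairwise (fun a b => pvLtB b a = false) := by
  induction ys with
  | nil => simp [PySem.List.insertBy]
  | cons y ys ih =>
    have hstep : PySem.List.insertBy pvLtB x (y :: ys)
        = if pvLtB x y = true then x :: y :: ys else y :: PySem.List.insertBy pvLtB x ys := rfl
    rw [hstep]
    rcases List.pairwise_cons.mp h with ⟨hy, hys⟩
    by_cases hxy : pvLtB x y = true
    · rw [if_pos hxy]
      refine List.pairwise_cons.mpr ⟨?_, h⟩
      intro z hz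
      rcases List.mem_cons.mp hz with hz | hz
      · subst hz; exact pv_lt_asymm _ _ hxy
      · exact pv_le_trans x y z (pv_lt_asymm _ _ hxy) (hy z hz)
    · rw [if_neg hxy]
      refine List.pairwise_cons.mpr ⟨?_, ih hys⟩
      intro z hz
      rcases (PySem.List.mem_insertBy pvLtB x z ys).mp hz with hz | hz
      · subst hz
        simpa using hxy
      · exact hy z hz

theorem pv_sortedLex_pairwise (xs : List (Int × Int × Int)) :
    (pvSortedLex xs).Pairwise (fun a b => pvLtB b a = false) := by
  rw [pvSortedLex]
  suffices h : ∀ (acc : List (Int × Int × Int)),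
      acc.Pairwise (fun a b => pvLtB b a = false) →
      (xs.foldl (fun acc x => PySem.List.insertBy pvLtB x acc) acc).Pairwise
        (fun a b => pvLtB b a = false) from h [] (by simp)
  induction xs with
  | nil => intro acc hacc; exact hacc
  | cons x xs ih =>
    intro acc hacc
    exact ih _ (pv_insert_pairwise x acc hacc)

theorem pv_insertBy_perm (x : Int × Int × Int) (ys : List (Int × Int × Int)) :
    (PySem.List.insertBy pvLtB x ys).Perm (x :: ys) := by
  induction ys with
  | nil => exact List.Perm.refl _
  | cons y ys ih =>
    have hstep : PySem.List.insertBy pvLtB x (y :: ys)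
        = if pvLtB x y = true then x :: y :: ys else y :: PySem.List.insertBy pvLtB x ys := rfl
    rw [hstep]
    by_cases hxy : pvLtB x y = true
    · rw [if_pos hxy]
    · rw [if_neg hxy]
      exact (ih.cons y).trans (List.Perm.swap x y ys)

theorem pv_sortedLex_perm (xs : List (Int × Int × Int)) : (pvSortedLex xs).Perm xs := by
  rw [pvSortedLex]
  suffices h : ∀ (acc : List (Int × Int × Int)),
      (xs.foldl (fun acc x => PySem.List.insertBy pvLtB x acc) acc).Perm (acc ++ xs) by
    simpa using h []
  induction xs with
  | nil => intro acc; simp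
  | cons x xs ih =>
    intro acc
    rw [List.foldl_cons]
    exact (ih _).trans
      (((pv_insertBy_perm x acc).append_right xs).trans List.perm_middle.symm)

-- the distinct duplicated events, as a finite set
def pvDups (l : List (Int × Int × Int)) : Finset (Int × Int × Int) :=
  l.toFinset.filter (fun e => 1 < l.count e)

theorem pv_countP_dedup (l : List (Int × Int × Int)) :
    ((PySem.List.dedup l).countP (fun e => decide (1 < l.count e)) : Int)
      = ((pvDups l).card : Int) := by
  have hnd : ((PySem.List.dedup l).filter (fun e => decide (1 < l.count e))).Nodup :=
    (PySem.List.nodup_dedup l).filter _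
  rw [List.countP_eq_length_filter, ← List.toFinset_card_of_nodup hnd]
  congr 2
  ext e
  simp [pvDups]

theorem pv_dups_perm (l l' : List (Int × Int × Int)) (h : l.Perm l') : pvDups l = pvDups l' := by
  unfold pvDups
  ext e
  simp only [Finset.mem_filter, List.mem_toFinset]
  rw [h.mem_iff, h.count_eq]

-- head of a dropWhile fails the test
theorem pv_dropWhile_head {α : Type} (p : α → Bool) :
    ∀ (l : List α) (y : α) (t : List α), l.dropWhile p = y :: t → p y = false := by
  intro l
  induction l with
  | nil => intro y t h; simp [List.dropWhile] at h
  | cons a l ih =>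
    intro y t h
    by_cases ha : p a = true
    · rw [List.dropWhile_cons_of_pos ha] at h
      exact ih y t h
    · rw [List.dropWhile_cons_of_neg ha] at h
      cases h
      simpa using ha

-- each step of the run scan peels off exactly one distinct value
theorem pv_countRuns_eq : ∀ (n : Nat) (l : List (Int × Int × Int)), l.length ≤ n →
    l.Pairwise (fun a b => pvLtB b a = false) → pvCountRuns l = ((pvDups l).card : Int) := by
  intro n
  induction n with
  | zero =>
    intro l hl _
    have : l = [] := List.eq_nil_of_length_eq_zero (Nat.le_zero.mp hl)
    subst this
    simp [pvCountRuns, pvDups]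
  | succ n ih =>
    intro l hl h
    cases l with
    | nil => simp [pvCountRuns, pvDups]
    | cons x xs =>
      rcases List.pairwise_cons.mp h with ⟨hx, hxs⟩
      set tw := xs.takeWhile (fun y => y == x) with htw
      set dw := xs.dropWhile (fun y => y == x) with hdw
      have htd : tw ++ dw = xs := List.takeWhile_append_dropWhile
      have htw_all : ∀ e ∈ tw, e = x := by
        intro e he
        have := List.mem_takeWhile_imp he
        simpa using this
      have hdw_sub : dw.Sublist (x :: xs) :=
        (List.dropWhile_sublist _).trans (List.sublist_cons_self x xs)
      have hdw_pw : dw.Pairwise (fun a b => pvLtB b a = false) := h.sublist hdw_sub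
      have hx_dw : x ∉ dw := by
        intro hmem
        cases hcase : dw with
        | nil => rw [hcase] at hmem; simp at hmem
        | cons y t =>
          have hy : (y == x) = false := pv_dropWhile_head _ xs y t (hdw ▸ hcase)
          have hyx : y ≠ x := by simpa using hy
          rw [hcase] at hmem
          rcases List.mem_cons.mp hmem with hm | hm
          · exact hyx hm.symm
          · -- x occurs after y in the sorted tail: y ≤ x and x ≤ y force y = x
            have h1 : pvLtB x y = false := by
              rcases List.pairwise_cons.mp (hcase ▸ hdw_pw) with ⟨hyall, _⟩
              exact hyall x hm
            have h2 : pvLtB y x = false := by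
              apply hx
              rw [← htd]
              exact List.mem_append_right tw (hcase ▸ List.mem_cons_self)
            exact hyx (pv_le_antisymm y x h1 h2)
      have hcount_x : (x :: xs).count x = tw.length + 1 := by
        rw [List.count_cons_self, ← htd, List.count_append]
        have h1 : tw.count x = tw.length := by
          rw [List.count_eq_length]
          intro e he
          exact ((htw_all e he) ▸ rfl)
        have h2 : dw.count x = 0 := List.count_eq_zero_of_not_mem hx_dw
        omega
      have hcount_ne : ∀ e, e ≠ x → (x :: xs).count e = dw.count e := by
        intro e he
        rw [List.count_cons_of_ne (Ne.symm he), ← htd, List.count_append]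
        have h1 : tw.count e = 0 := by
          rw [List.count_eq_zero]
          intro hc
          exact he (htw_all e hc)
        omega
      have hmem_ne : ∀ e, e ≠ x → (e ∈ x :: xs ↔ e ∈ dw) := by
        intro e he
        constructor
        · intro hc
          rcases List.mem_cons.mp hc with hc | hc
          · exact absurd hc he
          · rw [← htd] at hc
            rcases List.mem_append.mp hc with hc | hc
            · exact absurd (htw_all e hc) he
            · exact hc
        · intro hc
          apply List.mem_cons_of_mem
          rw [← htd]
          exact List.mem_append_right tw hc
      have hstep : pvCountRuns (x :: xs)
          = (if tw = [] then 0 else 1) + pvCountRuns dw := by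
        rw [pvCountRuns]
      have hih : pvCountRuns dw = ((pvDups dw).card : Int) := by
        apply ih dw _ hdw_pw
        calc dw.length ≤ xs.length := List.length_dropWhile_le _ _
          _ ≤ n := by simpa using hl
      by_cases h0 : tw = []
      · -- the head event is unique: it contributes nothing
        have hdups : pvDups (x :: xs) = pvDups dw := by
          unfold pvDups
          ext e
          simp only [Finset.mem_filter, List.mem_toFinset]
          by_cases he : e = x
          · subst he
            rw [hcount_x, h0]
            simp only [List.length_nil]
            constructor
            · intro hc; omega
            · intro hc
              exact absurd hc.1 hx_dw
          · rw [hcount_ne e he, hmem_ne e he]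
        rw [hstep, if_pos h0, hih, hdups]
        ring
      · -- the head event is duplicated: its run contributes one
        have hdups : pvDups (x :: xs) = insert x (pvDups dw) := by
          unfold pvDups
          ext e
          simp only [Finset.mem_filter, List.mem_toFinset, Finset.mem_insert]
          by_cases he : e = x
          · subst he
            have : tw.length ≠ 0 := fun hc => h0 (List.eq_nil_of_length_eq_zero hc)
            rw [hcount_x]
            constructor
            · intro _; left; rfl
            · intro _; exact ⟨List.mem_cons_self, by omega⟩
          · rw [hcount_ne e he, hmem_ne e he]
            simp [he]
        have hxnd : x ∉ pvDups dw := by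
          unfold pvDups
          simp only [Finset.mem_filter, List.mem_toFinset]
          intro hc
          exact hx_dw hc.1
        rw [hstep, if_neg h0, hih, hdups, Finset.card_insert_of_notMem hxnd]
        push_cast
        ring

-- B = the number of distinct duplicated events
theorem pv_B_count (all_paths : List (List (Int × Int))) :
    cal_accident_alt all_paths = ((pvDups (pvEvents all_paths)).card : Int) := by
  show pvCountRuns (pvSortedLex (pvEvents all_paths)) = _
  set S := pvSortedLex (pvEvents all_paths) with hS
  have hperm : S.Perm (pvEvents all_paths) := pv_sortedLex_perm _
  rw [pv_countRuns_eq S.length S le_rfl (hS ▸ pv_sortedLex_pairwise _), pv_dups_perm S _ hperm]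

-- ===== VERDICT (by name: the statement is the Claim_ definition above) =====
theorem cal_accident_spec : Claim_equal_cal_accident := by
  intro all_paths _
  unfold Spec_cal_accident
  rw [pv_A_count, pv_B_count, pv_countP_dedup]
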